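-- pv_equiv track=rewrite | github.com/Healthifyy/Backend | ml/predict.py | get_red_flags
-- ===== SOURCE A (Python) =====
-- def get_red_flags(clean_s: list, existing_conditions: list) -> list[str]:
--     """Check for dangerous symptom/condition combinations."""
--     conds = [c.lower() for c in existing_conditions]
--     flags = []
--
--     if "chest_pain" in clean_s and "breathlessness" in clean_s:
--         flags.append("Chest pain with breathlessness — possible cardiac emergency")
--     if "high_fever" in clean_s and "neck_stiffness" in clean_s:
--         flags.append("High fever with neck stiffness — possible meningitis")
--     if "diabetes" in conds and "high_fever" in clean_s:
--         flags.append("Diabetic patient with fever — elevated infection complication risk")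
--
--     if not flags:
--         flags.append("No immediate danger signs detected")
--
--     return flags
-- ===== SOURCE B (Python) =====
-- _CAR = "Chest pain with breathlessness — possible cardiac emergency"
-- _MEN = "High fever with neck stiffness — possible meningitis"
-- _DIA = "Diabetic patient with fever — elevated infection complication risk"
--
-- # 3-bit code: bit2 = cardiac rule, bit1 = meningitis rule, bit0 = diabetic rule.
-- _TABLE = [
--     ["No immediate danger signs detected"],  # 0
--     [_DIA],                                  # 1
--     [_MEN],                                  # 2
--     [_MEN, _DIA],                            # 3
--     [_CAR],                                  # 4
--     [_CAR, _DIA],                            # 5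
--     [_CAR, _MEN],                            # 6
--     [_CAR, _MEN, _DIA],                      # 7
-- ]
--
-- def get_red_flags(clean_s: list, existing_conditions: list) -> list[str]:
--     """Check for dangerous symptom/condition combinations (bitmask + table lookup)."""
--     s = set(clean_s)
--     conds = {c.lower() for c in existing_conditions}
--     code = ((("chest_pain" in s) and ("breathlessness" in s)) << 2) \
--          | ((("high_fever" in s) and ("neck_stiffness" in s)) << 1) \
--          | (("diabetes" in conds) and ("high_fever" in s))
--     return list(_TABLE[code])
-- ===== Notes on version B (the rewrite author's own statement) =====
-- stated objective: alternative
-- what changed: B replaces A's sequential append-if chain and empty-list fallback by computing a 3-bit code from the three rule conditions (via set membership) and returning the precomputed answer from an 8-entry lookup table, so no flag list is ever built incrementally.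
import Mathlib
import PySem

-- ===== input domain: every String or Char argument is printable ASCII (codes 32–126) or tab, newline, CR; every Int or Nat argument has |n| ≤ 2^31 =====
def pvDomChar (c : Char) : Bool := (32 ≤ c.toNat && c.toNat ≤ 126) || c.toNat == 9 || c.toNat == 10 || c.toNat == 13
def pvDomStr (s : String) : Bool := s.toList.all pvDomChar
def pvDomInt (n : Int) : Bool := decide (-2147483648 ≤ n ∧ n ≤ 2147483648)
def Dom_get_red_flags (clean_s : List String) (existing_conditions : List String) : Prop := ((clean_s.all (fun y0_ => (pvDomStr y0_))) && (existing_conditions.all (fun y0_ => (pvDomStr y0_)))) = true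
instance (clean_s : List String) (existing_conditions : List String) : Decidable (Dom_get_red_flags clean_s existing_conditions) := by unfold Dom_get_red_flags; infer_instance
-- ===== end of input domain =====

-- B replaces A's sequential append-if chain and fallback by a 3-bit condition code
-- indexing an 8-entry precomputed answer table (alternative decomposition; same cost).

-- ===== PORT A =====
def get_red_flags (clean_s : List String) (existing_conditions : List String) : List String :=
  let conds := existing_conditions.map PySem.Str.lower
  let flags : List String := []
  let flags := if clean_s.contains "chest_pain" && clean_s.contains "breathlessness" then
      flags ++ ["Chest pain with breathlessness — possible cardiac emergency"] else flags
  let flags := if clean_s.contains "high_fever" && clean_s.contains "neck_stiffness" then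
      flags ++ ["High fever with neck stiffness — possible meningitis"] else flags
  let flags := if conds.contains "diabetes" && clean_s.contains "high_fever" then
      flags ++ ["Diabetic patient with fever — elevated infection complication risk"] else flags
  let flags := if flags.isEmpty then flags ++ ["No immediate danger signs detected"] else flags
  flags

-- ===== PORT B =====
def pvTable : List (List String) :=
  [ ["No immediate danger signs detected"],
    ["Diabetic patient with fever — elevated infection complication risk"],
    ["High fever with neck stiffness — possible meningitis"],
    ["High fever with neck stiffness — possible meningitis",
     "Diabetic patient with fever — elevated infection complication risk"],
    ["Chest pain with breathlessness — possible cardiac emergency"],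
    ["Chest pain with breathlessness — possible cardiac emergency",
     "Diabetic patient with fever — elevated infection complication risk"],
    ["Chest pain with breathlessness — possible cardiac emergency",
     "High fever with neck stiffness — possible meningitis"],
    ["Chest pain with breathlessness — possible cardiac emergency",
     "High fever with neck stiffness — possible meningitis",
     "Diabetic patient with fever — elevated infection complication risk"] ]

def get_red_flags_alt (clean_s : List String) (existing_conditions : List String) : List String :=
  let s := PySem.Set.ofList clean_s
  let conds := PySem.Set.ofList (existing_conditions.map PySem.Str.lower)
  -- (b1 and b2) << 2 | (b3 and b4) << 1 | (b5 and b3): bools as 0/1 bits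
  let code : Int :=
      (if s.contains "chest_pain" && s.contains "breathlessness" then 4 else 0)
    + (if s.contains "high_fever" && s.contains "neck_stiffness" then 2 else 0)
    + (if conds.contains "diabetes" && s.contains "high_fever" then 1 else 0)
  PySem.List.pyGetD pvTable code []

-- ===== PRECONDITION & SPEC =====
def Spec_get_red_flags (clean_s : List String) (existing_conditions : List String) (out : List String) : Prop := out = get_red_flags_alt clean_s existing_conditions
instance (clean_s : List String) (existing_conditions : List String) (out : List String) : Decidable (Spec_get_red_flags clean_s existing_conditions out) := by unfold Spec_get_red_flags; infer_instance

-- ===== CLAIM =====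
def Claim_equal_get_red_flags : Prop := ∀ (clean_s : List String) (existing_conditions : List String), Dom_get_red_flags clean_s existing_conditions → Spec_get_red_flags clean_s existing_conditions (get_red_flags clean_s existing_conditions)

-- ===== LEMMAS AND PROOFS =====

-- ===== VERDICT =====
theorem get_red_flags_spec : Claim_equal_get_red_flags := by
  intro cs ec _
  unfold Spec_get_red_flags get_red_flags get_red_flags_alt pvTable
  by_cases h1 : "chest_pain" ∈ cs <;>
  by_cases h2 : "breathlessness" ∈ cs <;>
  by_cases h3 : "high_fever" ∈ cs <;>
  by_cases h4 : "neck_stiffness" ∈ cs <;>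
  by_cases h5 : "diabetes" ∈ ec.map PySem.Str.lower <;>
  simp [h1, h2, h3, h4, h5, PySem.Set.mem_ofList, List.contains_eq_mem,
        PySem.Set.contains, PySem.List.pyGetD, PySem.List.pyGet?, PySem.List.pyIdx?]
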